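-- pv_equiv track=rewrite | github.com/AustenLowder2002/Lowder-Coding | BallState-2023/Python-DataMining/cs455_homework2_Lowder_program.py | compute_distance_nominal
-- ===== SOURCE A (Python) =====
-- def compute_distance_nominal(data):
--     distance_matrix = []
--     for i in range(len(data)):
--         temp = []
--         for j in range(len(data)):
--             if (data[i] != data[j]):
--                 difference = 1
--             else:
--                 difference = 0
--             temp.append(difference)
--         distance_matrix.append(temp)
--     return distance_matrix
-- ===== SOURCE B (Python) =====
-- def compute_distance_nominal(data):
--     # Build only the upper triangle; mirror lower-triangle entries from
--     # already-built rows and place a constant 0 on the diagonal.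
--     rows = []
--     for i in range(len(data)):
--         x = data[i]
--         upper = [1 if x != y else 0 for y in data[i + 1:]]
--         rows.append([rows[j][i] for j in range(i)] + [0] + upper)
--     return rows
-- ===== Notes on version B (the rewrite author's own statement) =====
-- stated objective: alternative
-- what changed: B exploits symmetry: it computes each pairwise comparison only once for the upper triangle, mirrors lower-triangle entries from already-built rows, and writes a constant 0 on the diagonal, instead of A's full n*n comparison loop.
import Mathlib
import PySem

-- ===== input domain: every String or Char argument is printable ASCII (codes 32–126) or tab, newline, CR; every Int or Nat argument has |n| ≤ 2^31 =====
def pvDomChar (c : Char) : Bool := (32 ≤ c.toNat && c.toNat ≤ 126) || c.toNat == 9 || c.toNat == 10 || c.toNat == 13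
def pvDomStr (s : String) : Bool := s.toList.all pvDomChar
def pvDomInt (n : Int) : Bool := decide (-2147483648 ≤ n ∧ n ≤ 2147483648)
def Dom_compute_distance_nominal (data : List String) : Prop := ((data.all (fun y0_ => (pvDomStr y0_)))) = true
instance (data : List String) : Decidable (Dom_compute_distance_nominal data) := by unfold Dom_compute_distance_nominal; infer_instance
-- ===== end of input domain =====

-- B computes each pairwise comparison once (upper triangle), mirrors the lower
-- triangle from already-built rows and writes a constant 0 on the diagonal,
-- instead of A's full n×n comparison loop; objective: alternative algorithm.

-- ===== PORT A =====
-- data[i] with 0 ≤ i < len(data) is ported as data.getD i "" (exact: the index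
-- is always in range inside range(len(data))).
def compute_distance_nominal (data : List String) : List (List Int) :=
  (List.range data.length).foldl (fun distance_matrix i =>
    distance_matrix ++
      [(List.range data.length).foldl (fun temp j =>
        temp ++ [if data.getD i "" ≠ data.getD j "" then (1 : Int) else 0]) []]) []

-- ===== PORT B =====
-- data[i+1:] is ported as data.drop (i+1) (exact: i+1 ≥ 0); rows[j][i] with
-- in-range indices as (rows.getD j []).getD i 0.
def compute_distance_nominal_alt (data : List String) : List (List Int) :=
  (List.range data.length).foldl (fun rows i =>
    let x := data.getD i ""
    let upper := (data.drop (i + 1)).map (fun y => if x ≠ y then (1 : Int) else 0)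
    rows ++ [((List.range i).map (fun j => (rows.getD j []).getD i 0)) ++ [0] ++ upper]) []

-- ===== PRECONDITION & SPEC =====
def Spec_compute_distance_nominal (data : List String) (out : List (List Int)) : Prop := out = compute_distance_nominal_alt data
instance (data : List String) (out : List (List Int)) : Decidable (Spec_compute_distance_nominal data out) := by unfold Spec_compute_distance_nominal; infer_instance

-- ===== CLAIM (what is proved, stated in full; the proofs are below) =====
def Claim_equal_compute_distance_nominal : Prop := ∀ (data : List String), Dom_compute_distance_nominal data → Spec_compute_distance_nominal data (compute_distance_nominal data)

-- ===== LEMMAS AND PROOFS =====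

/-- Entry (i,j) of the distance matrix. -/
def pvT (data : List String) (i j : Nat) : Int :=
  if data.getD i "" ≠ data.getD j "" then 1 else 0

/-- Row i of the distance matrix. -/
def pvRow (data : List String) (i : Nat) : List Int :=
  (List.range data.length).map (pvT data i)

/-- The full distance matrix. -/
def pvM (data : List String) : List (List Int) :=
  (List.range data.length).map (pvRow data)

theorem pv_foldl_push {α β : Type} (f : α → β) :
    ∀ (l : List α) (acc : List β),
      l.foldl (fun a x => a ++ [f x]) acc = acc ++ l.map f := by
  intro l
  induction l with
  | nil => intro acc; simp
  | cons x xs ih => intro acc; simp [ih]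

theorem pvA_eq_M (data : List String) :
    compute_distance_nominal data = pvM data := by
  unfold compute_distance_nominal pvM pvRow pvT
  simp only [pv_foldl_push, List.nil_append]

theorem pvT_symm (data : List String) (i j : Nat) :
    pvT data i j = pvT data j i := by
  unfold pvT
  by_cases h : data.getD i "" = data.getD j ""
  · rw [h]
  · rw [if_pos h, if_pos (Ne.symm h)]

theorem pvT_diag (data : List String) (i : Nat) : pvT data i i = 0 := by
  simp [pvT]

theorem pv_getD_map_range {β : Type} (f : Nat → β) (d : β) (n j : Nat) (h : j < n) :
    ((List.range n).map f).getD j d = f j := by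
  rw [List.getD_eq_getElem?_getD, List.getElem?_map, List.getElem?_range h]
  rfl

theorem pv_drop_as_range (l : List String) (k : Nat) :
    l.drop k = (List.range' k (l.length - k)).map (fun j => l.getD j "") := by
  apply List.ext_getElem
  · simp
  · intro t h1 h2
    simp only [List.getElem_drop, List.getElem_map, List.getElem_range', Nat.one_mul]
    have hk : k + t < l.length := by
      simp at h2; omega
    rw [List.getD_eq_getElem l "" hk]

theorem pvB_step (data : List String) (i : Nat) (hi : i < data.length) :
    ((List.range i).map (fun j =>
        ((((List.range i).map (pvRow data)).getD j []).getD i 0)))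
      ++ [0]
      ++ (data.drop (i + 1)).map
          (fun y => if data.getD i "" ≠ y then (1 : Int) else 0)
    = pvRow data i := by
  have hmirror : ∀ j ∈ List.range i,
      ((((List.range i).map (pvRow data)).getD j []).getD i 0) = pvT data i j := by
    intro j hj
    rw [List.mem_range] at hj
    rw [pv_getD_map_range (pvRow data) [] i j hj]
    unfold pvRow
    rw [pv_getD_map_range (pvT data j) 0 data.length i hi]
    exact (pvT_symm data i j).symm
  have hupper :
      (data.drop (i + 1)).map (fun y => if data.getD i "" ≠ y then (1 : Int) else 0)
        = (List.range' (i + 1) (data.length - (i + 1))).map (pvT data i) := by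
    rw [pv_drop_as_range data (i + 1), List.map_map]
    rfl
  have hsplit : List.range data.length
      = List.range i ++ i :: List.range' (i + 1) (data.length - (i + 1)) := by
    rw [List.range_eq_range']
    have h1 : data.length = i + (data.length - i) := by omega
    have h2 : data.length - i = (data.length - (i + 1)) + 1 := by omega
    calc List.range' 0 data.length
        = List.range' 0 i ++ List.range' i (data.length - i) := by
            rw [h1]
            have := List.range'_append (s := 0) (m := i)
              (n := data.length - i) (step := 1)
            simpa using this.symm
      _ = List.range i ++ i :: List.range' (i + 1) (data.length - (i + 1)) := by
            rw [List.range_eq_range', h2, List.range'_succ]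
  rw [List.map_congr_left hmirror, hupper]
  unfold pvRow
  rw [hsplit]
  simp [pvT_diag]

theorem pvB_inv (data : List String) :
    ∀ (m i : Nat), i + m = data.length →
      (List.range' i m).foldl (fun rows i =>
        rows ++ [((List.range i).map (fun j => (rows.getD j []).getD i 0)) ++ [0] ++
          (data.drop (i + 1)).map
            (fun y => if data.getD i "" ≠ y then (1 : Int) else 0)])
        ((List.range i).map (pvRow data))
      = pvM data := by
  intro m
  induction m with
  | zero =>
      intro i h
      simp only [List.range', List.foldl_nil]
      rw [Nat.add_zero] at h
      rw [h]; rfl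
  | succ m ih =>
      intro i h
      rw [List.range'_succ, List.foldl_cons]
      have hi : i < data.length := by omega
      have hstep : ((List.range i).map (pvRow data)) ++
          [((List.range i).map (fun j =>
              ((((List.range i).map (pvRow data)).getD j []).getD i 0))) ++ [0] ++
            (data.drop (i + 1)).map
              (fun y => if data.getD i "" ≠ y then (1 : Int) else 0)]
          = (List.range (i + 1)).map (pvRow data) := by
        rw [pvB_step data i hi, List.range_succ, List.map_append]
        rfl
      rw [hstep]
      exact ih (i + 1) (by omega)

theorem pvB_eq_M (data : List String) :
    compute_distance_nominal_alt data = pvM data := by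
  unfold compute_distance_nominal_alt
  rw [List.range_eq_range']
  exact pvB_inv data data.length 0 (by omega)

-- ===== VERDICT (by name: the statement is the Claim_ definition above) =====
theorem compute_distance_nominal_spec : Claim_equal_compute_distance_nominal := by
  intro data _
  unfold Spec_compute_distance_nominal
  rw [pvA_eq_M, pvB_eq_M]
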